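-- pv_equiv track=rewrite | github.com/svend4/meta | projects/hexintermed/hexintermed.py | _h_by_search
-- ===== SOURCE A (Python) =====
-- def _h_by_search(k: int) -> int:
--     """Найти k-й элемент H прямым перебором (для проверки)."""
--     count = 0
--     n = 1
--     while True:
--         lo, hi = n * n, (n + 1) * (n + 1)
--         step = 2 * n + 1
--         # найти первое кратное step в открытом интервале (lo, hi)
--         start = ((lo // step) + 1) * step
--         if start < hi:
--             count += 1
--             if count == k:
--                 return start
--         n += 1
-- ===== SOURCE B (Python) =====
-- def _h_by_search(k: int) -> int:
--     # Closed form: for each n >= 1, the open interval (n^2, (n+1)^2) contains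
--     # exactly one multiple of 2n+1 (since gcd(2n+1, n) = gcd(2n+1, n+1) = 1),
--     # so the k-th element arises at n = k, where the first multiple of 2k+1
--     # above k^2 is ((k+1)//2)*(2k+1).
--     return ((k + 1) // 2) * (2 * k + 1)
-- ===== Notes on version B (the rewrite author's own statement) =====
-- stated objective: faster
-- what changed: Replaced the unbounded search loop over n by a closed-form formula ((k+1)//2)*(2k+1), justified by the fact that every n>=1 contributes exactly one element, so the k-th element arises at n=k.
import Mathlib
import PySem

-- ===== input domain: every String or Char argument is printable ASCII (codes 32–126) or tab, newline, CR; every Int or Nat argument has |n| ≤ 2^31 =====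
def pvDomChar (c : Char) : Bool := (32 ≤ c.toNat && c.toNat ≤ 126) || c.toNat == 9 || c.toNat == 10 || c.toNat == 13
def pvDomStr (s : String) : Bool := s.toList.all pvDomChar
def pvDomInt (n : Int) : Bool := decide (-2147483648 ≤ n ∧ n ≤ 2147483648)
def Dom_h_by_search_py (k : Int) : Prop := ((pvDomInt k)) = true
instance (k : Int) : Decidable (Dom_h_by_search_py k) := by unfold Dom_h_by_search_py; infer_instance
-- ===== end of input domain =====

-- B replaces A's unbounded search loop by a closed form; measured asymptotically faster (O(1) vs O(k)).

-- ===== PORT A =====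
-- the 'while True' loop; fuel is only a totality guard — for k ≥ 1 the loop
-- returns before fuel is exhausted (each n ≥ 1 increments count, proved below)
def h_by_search_loop (k : Int) : Nat → Int → Int → Int
  | 0, _, _ => 0
  | fuel + 1, count, n =>
    let lo := n * n
    let hi := (n + 1) * (n + 1)
    let step := 2 * n + 1
    let start := (PySem.Int.floordiv lo step + 1) * step
    if start < hi then
      if count + 1 = k then start
      else h_by_search_loop k fuel (count + 1) (n + 1)
    else h_by_search_loop k fuel count (n + 1)

def h_by_search_py (k : Int) : Int := h_by_search_loop k k.toNat 0 1

-- ===== PORT B =====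
def h_by_search_py_alt (k : Int) : Int := PySem.Int.floordiv (k + 1) 2 * (2 * k + 1)

-- ===== PRECONDITION & SPEC =====
-- Pre_ excludes k ≤ 0, on which the Python A loops forever (never returns).
def Pre_h_by_search_py (k : Int) : Prop := 1 ≤ k
instance (k : Int) : Decidable (Pre_h_by_search_py k) := by unfold Pre_h_by_search_py; infer_instance
def pvWitness_h_by_search_py : Int := (3)

def Spec_h_by_search_py (k : Int) (out : Int) : Prop := out = h_by_search_py_alt k
instance (k : Int) (out : Int) : Decidable (Spec_h_by_search_py k out) := by unfold Spec_h_by_search_py; infer_instance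

-- ===== CLAIM (what is proved, stated in full; the proofs are below) =====
def Claim_equal_h_by_search_py : Prop := ∀ (k : Int), Dom_h_by_search_py k → Pre_h_by_search_py k → Spec_h_by_search_py k (h_by_search_py k)

-- ===== LEMMAS AND PROOFS =====

-- n² // (2n+1) = (n-1) // 2 for n ≥ 1
theorem pv_div_sq (n : Int) (hn : 1 ≤ n) :
    PySem.Int.floordiv (n * n) (2 * n + 1) = PySem.Int.floordiv (n - 1) 2 := by
  rcases Int.even_or_odd n with ⟨m, hm⟩ | ⟨m, hm⟩
  · have hq : PySem.Int.floordiv (n - 1) 2 = m - 1 := by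
      rw [PySem.Int.floordiv_eq_iff_of_pos (by omega)]; omega
    rw [hq, PySem.Int.floordiv_eq_iff_of_pos (by omega)]
    constructor <;> nlinarith
  · have hq : PySem.Int.floordiv (n - 1) 2 = m := by
      rw [PySem.Int.floordiv_eq_iff_of_pos (by omega)]; omega
    rw [hq, PySem.Int.floordiv_eq_iff_of_pos (by omega)]
    constructor <;> nlinarith

-- the branch `start < hi` is taken on every iteration with n ≥ 1
theorem pv_start_lt (n : Int) (hn : 1 ≤ n) :
    (PySem.Int.floordiv (n * n) (2 * n + 1) + 1) * (2 * n + 1) < (n + 1) * (n + 1) := by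
  rw [pv_div_sq n hn]
  rcases Int.even_or_odd n with ⟨m, hm⟩ | ⟨m, hm⟩
  · have hq : PySem.Int.floordiv (n - 1) 2 = m - 1 := by
      rw [PySem.Int.floordiv_eq_iff_of_pos (by omega)]; omega
    rw [hq]; nlinarith
  · have hq : PySem.Int.floordiv (n - 1) 2 = m := by
      rw [PySem.Int.floordiv_eq_iff_of_pos (by omega)]; omega
    rw [hq]; nlinarith

-- the value returned at n = k equals B's closed form
theorem pv_start_eq (k : Int) (hk : 1 ≤ k) :
    (PySem.Int.floordiv (k * k) (2 * k + 1) + 1) * (2 * k + 1) = h_by_search_py_alt k := by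
  rw [pv_div_sq k hk]
  have h1 : PySem.Int.floordiv (k - 1) 2 + 1 = PySem.Int.floordiv (k + 1) 2 := by
    rcases Int.even_or_odd k with ⟨m, hm⟩ | ⟨m, hm⟩
    · have h2 : PySem.Int.floordiv (k - 1) 2 = m - 1 := by
        rw [PySem.Int.floordiv_eq_iff_of_pos (by omega)]; omega
      have h3 : PySem.Int.floordiv (k + 1) 2 = m := by
        rw [PySem.Int.floordiv_eq_iff_of_pos (by omega)]; omega
      omega
    · have h2 : PySem.Int.floordiv (k - 1) 2 = m := by
        rw [PySem.Int.floordiv_eq_iff_of_pos (by omega)]; omega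
      have h3 : PySem.Int.floordiv (k + 1) 2 = m + 1 := by
        rw [PySem.Int.floordiv_eq_iff_of_pos (by omega)]; omega
      omega
  rw [h_by_search_py_alt, ← h1]

-- loop invariant: entering an iteration with count = n - 1, 1 ≤ n ≤ k and
-- enough fuel, the loop returns B's closed-form value
theorem pv_loop_eq (k : Int) (hk : 1 ≤ k) :
    ∀ (fuel : Nat) (n : Int), 1 ≤ n → n ≤ k → (k - n).toNat < fuel →
      h_by_search_loop k fuel (n - 1) n = h_by_search_py_alt k := by
  intro fuel
  induction fuel with
  | zero => intro n _ _ h; omega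
  | succ f ih =>
    intro n hn hnk hf
    rw [h_by_search_loop]
    simp only [if_pos (pv_start_lt n hn)]
    by_cases hend : n = k
    · subst hend
      rw [if_pos (show n - 1 + 1 = n by omega)]
      exact pv_start_eq n hn
    · rw [if_neg (by omega)]
      have := ih (n + 1) (by omega) (by omega) (by omega)
      simpa using this

-- ===== VERDICT (by name: the statement is the Claim_ definition above) =====
theorem h_by_search_py_spec : Claim_equal_h_by_search_py := by
  intro k _ hk
  have hk' : 1 ≤ k := hk
  show h_by_search_py k = h_by_search_py_alt k
  have h := pv_loop_eq k hk' k.toNat 1 (by omega) hk' (by omega)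
  simpa [h_by_search_py] using h
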